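-- pv_equiv track=rewrite | github.com/Plopperzzz/zi-atlas | src/build_corpus.py | _parse_sig_params
-- ===== SOURCE A (Python) =====
-- def _parse_sig_params(raw: str) -> list[dict[str, str]]:
--     if not raw.strip():
--         return []
--     out: list[dict[str, str]] = []
--     depth = 0
--     buf = ""
--     for ch in raw + ",":
--         if ch in "([{<":
--             depth += 1; buf += ch
--         elif ch in ")]}>":
--             depth -= 1; buf += ch
--         elif ch == "," and depth == 0:
--             p = buf.strip()
--             buf = ""
--             if not p:
--                 continue
--             if "=" in p:
--                 p = p.split("=", 1)[0].strip()
--             if ":" in p: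
--                 n, t = p.split(":", 1)
--                 out.append({"name": n.strip(), "type": t.strip()})
--             else:
--                 out.append({"name": p, "type": ""})
--         else:
--             buf += ch
--     return out
-- ===== SOURCE B (Python) =====
-- def _split_top(raw):
--     """Positions of top-level commas in raw+',' -> list of chunk strings."""
--     s = raw + ","
--     cuts = [-1]
--     depth = 0
--     for i, ch in enumerate(s):
--         if ch in "([{<":
--             depth += 1
--         elif ch in ")]}>":
--             depth -= 1
--         elif ch == "," and depth == 0:
--             cuts.append(i)
--     return [s[a + 1:b] for a, b in zip(cuts, cuts[1:])]
--
--
-- def _param(chunk):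
--     p = chunk.strip()
--     if not p:
--         return None
--     if "=" in p:
--         p = p.split("=", 1)[0].strip()
--     if ":" in p:
--         n, t = p.split(":", 1)
--         return {"name": n.strip(), "type": t.strip()}
--     return {"name": p, "type": ""}
--
--
-- def _parse_sig_params(raw: str) -> list[dict[str, str]]:
--     if not raw.strip():
--         return []
--     return [d for d in map(_param, _split_top(raw)) if d is not None]
-- ===== Notes on version B (the rewrite author's own statement) =====
-- stated objective: alternative
-- what changed: A's single stateful loop (out/depth/buf mutated together, parsing done inside the comma branch) is split into two explicit phases: a depth-only scan that records the positions of top-level commas and slices the chunks out of the sentinel-terminated input, then a per-chunk parser helper mapped over that list with None-filtering.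
import Mathlib
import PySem

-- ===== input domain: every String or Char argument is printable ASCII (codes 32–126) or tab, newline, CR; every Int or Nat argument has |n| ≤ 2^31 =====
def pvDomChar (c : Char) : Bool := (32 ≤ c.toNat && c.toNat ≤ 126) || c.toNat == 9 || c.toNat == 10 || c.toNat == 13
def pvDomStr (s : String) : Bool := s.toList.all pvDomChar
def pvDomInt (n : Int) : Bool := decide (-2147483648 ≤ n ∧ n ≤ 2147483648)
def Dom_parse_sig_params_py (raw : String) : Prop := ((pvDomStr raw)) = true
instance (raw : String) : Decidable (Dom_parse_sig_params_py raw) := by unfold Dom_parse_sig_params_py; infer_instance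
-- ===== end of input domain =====

-- B restructures A's single stateful loop into two explicit phases — a depth-only scan that records
-- top-level comma positions and slices out the chunks, then a per-chunk parser mapped over that list
-- (objective: alternative decomposition, same cost).

-- ch in "([{<" / ch in ")]}>"
def pvOpen (c : Char) : Bool := ['(', '[', '{', '<'].contains c
def pvClose (c : Char) : Bool := [')', ']', '}', '>'].contains c

-- ===== PORT A =====
-- loop body of A: state (out, depth, buf)
def pvStepA (st : List (List (String × String)) × Int × List Char) (ch : Char) :
    List (List (String × String)) × Int × List Char :=
  match st with
  | (out, depth, buf) =>
    if pvOpen ch then (out, depth + 1, buf ++ [ch])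
    else if pvClose ch then (out, depth - 1, buf ++ [ch])
    else if ch = ',' ∧ depth = 0 then
      let p := PySem.Chars.strip buf
      if p = [] then (out, depth, [])
      else
        let p := if PySem.Chars.isIn ['='] p then
            PySem.Chars.strip ((PySem.Chars.splitOnMax p ['='] 1).getD 0 []) else p
        if PySem.Chars.isIn [':'] p then
          let parts := PySem.Chars.splitOnMax p [':'] 1
          (out ++ [[("name", String.ofList (PySem.Chars.strip (parts.getD 0 []))),
                    ("type", String.ofList (PySem.Chars.strip (parts.getD 1 [])))]], depth, [])
        else (out ++ [[("name", String.ofList p), ("type", "")]], depth, [])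
    else (out, depth, buf ++ [ch])

def parse_sig_params_py (raw : String) : List (List (String × String)) :=
  if PySem.Chars.strip raw.toList = [] then []
  else ((raw.toList ++ [',']).foldl pvStepA ([], 0, [])).1

-- ===== PORT B =====
-- phase-2 helper _param: one chunk -> optional {"name","type"} dict
def pvParam (chunk : List Char) : Option (List (String × String)) :=
  let p := PySem.Chars.strip chunk
  if p = [] then none
  else
    let p := if PySem.Chars.isIn ['='] p then
        PySem.Chars.strip ((PySem.Chars.splitOnMax p ['='] 1).getD 0 []) else p
    if PySem.Chars.isIn [':'] p then
      let parts := PySem.Chars.splitOnMax p [':'] 1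
      some [("name", String.ofList (PySem.Chars.strip (parts.getD 0 []))),
            ("type", String.ofList (PySem.Chars.strip (parts.getD 1 [])))]
    else some [("name", String.ofList p), ("type", "")]

-- phase-1 loop body of _split_top: state (cuts, depth)
def pvStepB (st : List Int × Int) (ic : Int × Char) : List Int × Int :=
  match st with
  | (cuts, depth) =>
    if pvOpen ic.2 then (cuts, depth + 1)
    else if pvClose ic.2 then (cuts, depth - 1)
    else if ic.2 = ',' ∧ depth = 0 then (cuts ++ [ic.1], depth)
    else (cuts, depth)

def parse_sig_params_py_alt (raw : String) : List (List (String × String)) :=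
  if PySem.Chars.strip raw.toList = [] then []
  else
    let s := raw.toList ++ [',']
    let cuts := ((PySem.List.enumerate s).foldl pvStepB ([-1], 0)).1
    let chunks := (cuts.zip (PySem.List.slice cuts (some 1) none)).map
        (fun p => PySem.List.slice s (some (p.1 + 1)) (some p.2))
    chunks.filterMap pvParam

-- ===== PRECONDITION & SPEC =====
def Spec_parse_sig_params_py (raw : String) (out : List (List (String × String))) : Prop := out = parse_sig_params_py_alt raw
instance (raw : String) (out : List (List (String × String))) : Decidable (Spec_parse_sig_params_py raw out) := by unfold Spec_parse_sig_params_py; infer_instance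

-- ===== CLAIM (what is proved, stated in full; the proofs are below) =====
def Claim_equal_parse_sig_params_py : Prop := ∀ (raw : String), Dom_parse_sig_params_py raw → Spec_parse_sig_params_py raw (parse_sig_params_py raw)

-- ===== LEMMAS AND PROOFS =====

-- chunk splitter in accumulator form (proof intermediary between the two ports)
def pvGosplit : List Char → Int → List Char → List (List Char)
  | [], _, _ => []
  | c :: r, d, buf =>
    if pvOpen c then pvGosplit r (d + 1) (buf ++ [c])
    else if pvClose c then pvGosplit r (d - 1) (buf ++ [c])
    else if c = ',' ∧ d = 0 then buf :: pvGosplit r d []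
    else pvGosplit r d (buf ++ [c])

-- positions of top-level commas, scanning at depth d from absolute index k
def pvCposs : List Char → Int → Int → List Int
  | [], _, _ => []
  | c :: r, d, k =>
    if pvOpen c then pvCposs r (d + 1) (k + 1)
    else if pvClose c then pvCposs r (d - 1) (k + 1)
    else if c = ',' ∧ d = 0 then k :: pvCposs r d (k + 1)
    else pvCposs r d (k + 1)

theorem pvFoldA_eq (t : List Char) : ∀ (out : List (List (String × String))) (d : Int) (buf : List Char),
    (t.foldl pvStepA (out, d, buf)).1 = out ++ (pvGosplit t d buf).filterMap pvParam := by
  induction t with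
  | nil => intro out d buf; simp [pvGosplit]
  | cons c r ih =>
    intro out d buf
    simp only [List.foldl_cons, pvStepA, pvGosplit]
    by_cases h1 : pvOpen c = true
    · simp [h1, ih]
    · by_cases h2 : pvClose c = true
      · simp [h1, h2, ih]
      · by_cases h3 : c = ',' ∧ d = 0
        · obtain ⟨rfl, rfl⟩ := h3
          simp only [h1, h2, Bool.false_eq_true, if_false, and_self, if_true]
          by_cases h4 : PySem.Chars.strip buf = []
          · simp [h4, ih, pvParam]
          · simp only [h4, if_false]
            split_ifs with h5 h6 h7
            · rw [ih, List.filterMap_cons]; simp only [pvParam]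
              rw [if_neg h4, if_pos h5, if_pos h6]; simp
            · rw [ih, List.filterMap_cons]; simp only [pvParam]
              rw [if_neg h4, if_pos h5, if_neg h6]; simp
            · rw [ih, List.filterMap_cons]; simp only [pvParam]
              rw [if_neg h4, if_neg h5, if_pos h7]; simp
            · rw [ih, List.filterMap_cons]; simp only [pvParam]
              rw [if_neg h4, if_neg h5, if_neg h7]; simp
        · simp [h1, h2, h3, ih]

theorem pvFoldB_eq (t : List Char) : ∀ (acc : List Int) (d k : Int),
    ((PySem.List.enumerate t k).foldl pvStepB (acc, d)).1 = acc ++ pvCposs t d k := by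
  induction t with
  | nil => intro acc d k; simp [PySem.List.enumerate_nil, pvCposs]
  | cons c r ih =>
    intro acc d k
    simp only [PySem.List.enumerate_cons, List.foldl_cons, pvStepB, pvCposs]
    by_cases h1 : pvOpen c = true
    · simp [h1, ih]
    · by_cases h2 : pvClose c = true
      · simp [h1, h2, ih]
      · by_cases h3 : c = ',' ∧ d = 0
        · obtain ⟨rfl, rfl⟩ := h3
          simp [h1, h2, ih]
        · simp [h1, h2, h3, ih]

theorem pvChunks_eq (t : List Char) : ∀ (s : List Char) (k m : Nat) (d : Int),
    s.drop k = t → m ≤ k →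
    ((((m : Int) - 1) :: pvCposs t d k).zip (pvCposs t d k)).map
        (fun p => PySem.List.slice s (some (p.1 + 1)) (some p.2))
      = pvGosplit t d ((s.take k).drop m) := by
  induction t with
  | nil => intro s k m d _ _; simp [pvCposs, pvGosplit]
  | cons c r ih =>
    intro s k m d hdrop hm
    have hk : k < s.length := by
      by_contra h
      simp [List.drop_eq_nil_of_le (Nat.le_of_not_lt h)] at hdrop
    have hdrop' : s.drop (k + 1) = r := by
      have := congrArg List.tail hdrop
      simpa [List.tail_drop] using this
    have hget : s[k] = c := by
      have h0 := congrArg (fun l : List Char => l[0]?) hdrop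
      simpa [List.getElem?_drop, List.getElem?_eq_getElem hk] using h0
    have htake : s.take (k + 1) = s.take k ++ [c] := by
      simp [List.take_add_one, List.getElem?_eq_getElem hk, hget]
    have hbufext : (s.take (k + 1)).drop m = (s.take k).drop m ++ [c] := by
      rw [htake, List.drop_append_of_le_length (by simp [List.length_take]; omega)]
    have hcast : (k : Int) + 1 = ((k + 1 : Nat) : Int) := by push_cast; ring
    simp only [pvCposs, pvGosplit]
    by_cases h1 : pvOpen c = true
    · simp only [h1, if_true]
      rw [hcast, ih s (k + 1) m (d + 1) hdrop' (by omega), hbufext]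
    · by_cases h2 : pvClose c = true
      · simp only [h1, h2, Bool.false_eq_true, if_false, if_true]
        rw [hcast, ih s (k + 1) m (d - 1) hdrop' (by omega), hbufext]
      · by_cases h3 : c = ',' ∧ d = 0
        · obtain ⟨rfl, rfl⟩ := h3
          simp only [h1, h2, Bool.false_eq_true, if_false, and_self, if_true,
            List.zip_cons_cons, List.map_cons]
          rw [hcast]
          have hhead : PySem.List.slice s (some ((m : Int) - 1 + 1)) (some (k : Int))
              = (s.take k).drop m := by
            have h9 : (m : Int) - 1 + 1 = (m : Int) := by ring
            rw [h9, PySem.List.slice_natCast, List.drop_take]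
          rw [hhead]
          have htail := ih s (k + 1) (k + 1) 0 hdrop' (Nat.le_refl _)
          have hcast2 : ((k + 1 : Nat) : Int) - 1 = (k : Int) := by push_cast; ring
          rw [hcast2] at htail
          rw [htail]
          have h8 : (s.take (k + 1)).drop (k + 1) = [] := by
            apply List.drop_eq_nil_of_le; simp [List.length_take]
          rw [h8]
        · simp only [h1, h2, h3, Bool.false_eq_true, if_false]
          rw [hcast, ih s (k + 1) m d hdrop' (by omega), hbufext]

-- ===== VERDICT (by name: the statement is the Claim_ definition above) =====
theorem parse_sig_params_py_spec : Claim_equal_parse_sig_params_py := by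
  intro raw _
  unfold Spec_parse_sig_params_py parse_sig_params_py parse_sig_params_py_alt
  by_cases h : PySem.Chars.strip raw.toList = []
  · simp [h]
  · simp only [h, if_false]
    rw [pvFoldA_eq, pvFoldB_eq, PySem.List.slice_from_one]
    have hz := pvChunks_eq (raw.toList ++ [',']) (raw.toList ++ [',']) 0 0 0 rfl (Nat.le_refl 0)
    simp only [Nat.cast_zero, zero_sub, List.take_zero, List.drop_nil] at hz
    simp only [List.singleton_append, List.tail_cons, List.nil_append]
    rw [hz]
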